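-- pv_equiv track=rewrite | github.com/canaokar/rag-module | lab-03-chunking/solution/step4.py | recursive_chunk
-- ===== SOURCE A (Python) =====
-- def split_paragraphs(text):
--     """Split text into paragraphs."""
--     raw = text.split("\n\n")
--     return [p.strip() for p in raw if p.strip()]
--
-- def split_sentences(text):
--     """Split text into sentences."""
--     raw_parts = text.replace("\n", " ").split(". ")
--     sentences = []
--     for part in raw_parts:
--         cleaned = part.strip()
--         if cleaned:
--             if not cleaned.endswith("."):
--                 cleaned += "."
--             sentences.append(cleaned)
--     return sentences
--
-- def recursive_chunk(text, target_words=200):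
--     """Recursively chunk text by paragraphs, sentences, then words."""
--     paragraphs = split_paragraphs(text)
--     small_pieces = []
--
--     for para in paragraphs:
--         if len(para.split()) <= target_words:
--             small_pieces.append(para)
--         else:
--             sentences = split_sentences(para)
--             for sentence in sentences:
--                 if len(sentence.split()) <= target_words:
--                     small_pieces.append(sentence)
--                 else:
--                     words = sentence.split()
--                     for i in range(0, len(words), target_words):
--                         small_pieces.append(" ".join(words[i : i + target_words]))
--
--     chunks = []
--     current_chunk = []
--     current_word_count = 0
--
--     for piece in small_pieces:
--         piece_words = len(piece.split())
--         if current_word_count + piece_words > target_words and current_chunk: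
--             chunks.append("\n\n".join(current_chunk))
--             current_chunk = [piece]
--             current_word_count = piece_words
--         else:
--             current_chunk.append(piece)
--             current_word_count += piece_words
--
--     if current_chunk:
--         chunks.append("\n\n".join(current_chunk))
--
--     return chunks
-- ===== SOURCE B (Python) =====
-- def split_paragraphs(text):
--     """Split text into paragraphs."""
--     raw = text.split("\n\n")
--     return [p.strip() for p in raw if p.strip()]
--
-- def split_sentences(text):
--     """Split text into sentences."""
--     raw_parts = text.replace("\n", " ").split(". ")
--     sentences = []
--     for part in raw_parts:
--         cleaned = part.strip()
--         if cleaned: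
--             if not cleaned.endswith("."):
--                 cleaned += "."
--             sentences.append(cleaned)
--     return sentences
--
-- def recursive_chunk(text, target_words=200):
--     """Recursively chunk text by paragraphs, sentences, then words."""
--
--     def word_count(s):
--         return len(s.split())
--
--     def split_recursive(piece, levels):
--         if word_count(piece) <= target_words:
--             return [piece]
--         if levels:
--             return [q for sub in levels[0](piece) for q in split_recursive(sub, levels[1:])]
--         ws = piece.split()
--         return [" ".join(ws[i:i + target_words]) for i in range(0, len(ws), target_words)]
--
--     pieces = [q for para in split_paragraphs(text)
--                 for q in split_recursive(para, [split_sentences])]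
--
--     def pack(ps):
--         if not ps:
--             return []
--         group = [ps[0]]
--         count = word_count(ps[0])
--         i = 1
--         while i < len(ps) and count + word_count(ps[i]) <= target_words:
--             group.append(ps[i])
--             count += word_count(ps[i])
--             i += 1
--         return ["\n\n".join(group)] + pack(ps[i:])
--
--     return pack(pieces)
-- ===== Notes on version B (the rewrite author's own statement) =====
-- stated objective: alternative
-- what changed: The hard-coded paragraph-then-sentence-then-word cascade becomes one recursive splitter parameterised by a list of split levels, and the stateful packing fold with a trailing flush becomes a recursive packer that peels off one maximal-prefix group at a time.
-- outside the precondition, e.g. on recursive_chunk('x', 0): A raises ValueError, B raises ValueError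
import Mathlib
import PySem

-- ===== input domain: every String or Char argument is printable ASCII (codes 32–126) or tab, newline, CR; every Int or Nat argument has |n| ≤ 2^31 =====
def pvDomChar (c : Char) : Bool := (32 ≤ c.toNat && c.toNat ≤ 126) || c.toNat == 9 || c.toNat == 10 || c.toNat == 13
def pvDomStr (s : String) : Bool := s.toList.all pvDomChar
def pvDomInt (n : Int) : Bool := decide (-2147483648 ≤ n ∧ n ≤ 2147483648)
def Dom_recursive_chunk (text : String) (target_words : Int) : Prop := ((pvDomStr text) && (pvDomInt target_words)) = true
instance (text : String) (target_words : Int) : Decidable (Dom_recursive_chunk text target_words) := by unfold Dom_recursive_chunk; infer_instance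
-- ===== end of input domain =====

-- B replaces A's hard-coded paragraph→sentence→word cascade by one recursive splitter over a
-- list of split levels, and A's stateful packing fold by a recursive maximal-prefix packer
-- (objective: alternative decomposition, same cost).

-- ===== PORT A =====
-- shared module-level helpers (identical in Source A and Source B)
def pvWc (s : String) : Int := ((PySem.Str.split₀ s).length : Int)

-- text.split("\n\n") : separator is a non-empty literal, so split? is always `some`
def pvSplitParagraphs (text : String) : List String :=
  (((PySem.Str.split? text "\n\n").getD []).map PySem.Str.strip).filter (fun p => p != "")

def pvSplitSentences (text : String) : List String :=
  let raw_parts := (PySem.Str.split? (PySem.Str.replace text "\n" " ") ". ").getD []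
  raw_parts.foldl (fun sentences part =>
    let cleaned := PySem.Str.strip part
    if cleaned != "" then
      let cleaned := if !(PySem.Str.endswith cleaned ".") then cleaned ++ "." else cleaned
      sentences ++ [cleaned]
    else sentences) []

-- the body of A's packing loop, one step per piece; state = (chunks, current_chunk, current_word_count)
def pvPackStep (target_words : Int) (st : List String × List String × Int) (piece : String) :
    List String × List String × Int :=
  let piece_words := pvWc piece
  if st.2.2 + piece_words > target_words ∧ st.2.1 ≠ [] then
    (st.1 ++ [PySem.Str.join "\n\n" st.2.1], ([piece], piece_words))
  else
    (st.1, (st.2.1 ++ [piece], st.2.2 + piece_words))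

-- the body of A's innermost (word-level) loop over range(0, len(words), target_words)
def pvWordStep (target_words : Int) (words : List String) (acc : List String) (i : Int) : List String :=
  acc ++ [PySem.Str.join " " (PySem.List.slice words (some i) (some (i + target_words)))]

-- the body of A's sentence loop
def pvSentenceStep (target_words : Int) (acc : List String) (sentence : String) : List String :=
  if pvWc sentence ≤ target_words then acc ++ [sentence]
  else
    let words := PySem.Str.split₀ sentence
    (PySem.List.pyRange 0 (words.length : Int) target_words).foldl (pvWordStep target_words words) acc

-- the body of A's paragraph loop
def pvParaStep (target_words : Int) (acc : List String) (para : String) : List String :=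
  if pvWc para ≤ target_words then acc ++ [para]
  else (pvSplitSentences para).foldl (pvSentenceStep target_words) acc

def recursive_chunk (text : String) (target_words : Int) : List String :=
  let paragraphs := pvSplitParagraphs text
  let small_pieces : List String := paragraphs.foldl (pvParaStep target_words) []
  let st := small_pieces.foldl (pvPackStep target_words) ([], ([], 0))
  if st.2.1 ≠ [] then st.1 ++ [PySem.Str.join "\n\n" st.2.1] else st.1

-- ===== PORT B =====
-- word-level base case: [" ".join(ws[i:i+t]) for i in range(0, len(ws), t)]
def pvWordChunks (t : Int) (piece : String) : List String :=
  let ws := PySem.Str.split₀ piece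
  (PySem.List.pyRange 0 (ws.length : Int) t).map
    (fun i => PySem.Str.join " " (PySem.List.slice ws (some i) (some (i + t))))

-- split_recursive(piece, levels)
def pvSplitRec (t : Int) : List (String → List String) → String → List String
  | levels, piece =>
    if pvWc piece ≤ t then [piece]
    else
      match levels with
      | f :: rest => (f piece).flatMap (pvSplitRec t rest)
      | [] => pvWordChunks t piece
  termination_by levels _ => levels.length

-- the while-loop of pack: extend the group while the next piece still fits; returns (group, rest)
def pvTakeGroup (t : Int) (cur : List String) (cnt : Int) : List String → List String × List String
  | [] => (cur, [])
  | p :: ps =>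
    if cnt + pvWc p ≤ t then pvTakeGroup t (cur ++ [p]) (cnt + pvWc p) ps
    else (cur, p :: ps)

theorem pvTakeGroup_rest_length (t : Int) :
    ∀ (ps : List String) (cur : List String) (cnt : Int),
      (pvTakeGroup t cur cnt ps).2.length ≤ ps.length := by
  intro ps
  induction ps with
  | nil => intro cur cnt; simp [pvTakeGroup]
  | cons p ps ih =>
    intro cur cnt
    simp only [pvTakeGroup]
    split
    · exact le_trans (ih _ _) (Nat.le_succ _)
    · simp

def pvPack (t : Int) : List String → List String
  | [] => []
  | p :: ps =>
    let g := pvTakeGroup t [p] (pvWc p) ps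
    PySem.Str.join "\n\n" g.1 :: pvPack t g.2
  termination_by ps => ps.length
  decreasing_by
    simpa using Nat.lt_succ_of_le (pvTakeGroup_rest_length t ps [p] (pvWc p))

def recursive_chunk_alt (text : String) (target_words : Int) : List String :=
  let pieces := (pvSplitParagraphs text).flatMap (pvSplitRec target_words [pvSplitSentences])
  pvPack target_words pieces

-- ===== PRECONDITION & SPEC =====
-- Pre_ excludes exactly the inputs where Python A raises: target_words == 0 together with a text
-- containing a non-whitespace character reaches range(0, len(words), 0), a ValueError.
def Pre_recursive_chunk (text : String) (target_words : Int) : Prop :=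
  target_words ≠ 0 ∨ PySem.Str.strip text = ""
instance (text : String) (target_words : Int) : Decidable (Pre_recursive_chunk text target_words) := by
  unfold Pre_recursive_chunk; infer_instance

def pvWitness_recursive_chunk : String × Int :=
  ("One two three four five. Six seven.\n\nEight nine.", 4)

def Spec_recursive_chunk (text : String) (target_words : Int) (out : List String) : Prop :=
  out = recursive_chunk_alt text target_words
instance (text : String) (target_words : Int) (out : List String) :
    Decidable (Spec_recursive_chunk text target_words out) := by
  unfold Spec_recursive_chunk; infer_instance

-- ===== CLAIM (what is proved, stated in full; the proofs are below) =====
def Claim_equal_recursive_chunk : Prop := ∀ (text : String) (target_words : Int), Dom_recursive_chunk text target_words → Pre_recursive_chunk text target_words → Spec_recursive_chunk text target_words (recursive_chunk text target_words)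

-- ===== LEMMAS AND PROOFS =====

-- A's sentence-loop body contributes exactly pvSplitRec at word level
theorem pv_inner_eq (t : Int) (acc : List String) (s : String) :
    pvSentenceStep t acc s = acc ++ pvSplitRec t [] s := by
  rw [pvSplitRec, pvSentenceStep]
  split
  · rfl
  · simp only [pvWordChunks]
    exact PySem.List.foldl_append_singleton_eq_map
      (fun i => PySem.Str.join " " (PySem.List.slice (PySem.Str.split₀ s) (some i) (some (i + t))))
      (PySem.List.pyRange 0 ((PySem.Str.split₀ s).length : Int) t) acc

-- A's paragraph-loop body contributes exactly pvSplitRec at sentence level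
theorem pv_para_eq (t : Int) (acc : List String) (para : String) :
    pvParaStep t acc para = acc ++ pvSplitRec t [pvSplitSentences] para := by
  rw [pvSplitRec, pvParaStep]
  split
  · rfl
  · rw [PySem.List.foldl_congr_mem' (pvSplitSentences para) (pvSentenceStep t)
        (fun acc s => acc ++ pvSplitRec t [] s) acc (fun s _ acc => pv_inner_eq t acc s)]
    exact PySem.List.foldl_append_eq_flatMap _ _ _

-- A's small_pieces accumulation = B's flatMap over the recursive splitter
theorem pv_small_pieces_eq (t : Int) (paragraphs : List String) :
    paragraphs.foldl (pvParaStep t) []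
    = paragraphs.flatMap (pvSplitRec t [pvSplitSentences]) := by
  rw [PySem.List.foldl_congr_mem' paragraphs (pvParaStep t)
        (fun acc para => acc ++ pvSplitRec t [pvSplitSentences] para) []
        (fun para _ acc => pv_para_eq t acc para)]
  simpa using PySem.List.foldl_append_eq_flatMap (pvSplitRec t [pvSplitSentences]) paragraphs []

-- invariant of A's packing loop, phrased against B's maximal-prefix packer
theorem pv_pack_loop (t : Int) :
    ∀ (pieces chunks cur : List String) (cnt : Int), cur ≠ [] →
      (if (pieces.foldl (pvPackStep t) (chunks, (cur, cnt))).2.1 ≠ [] then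
         (pieces.foldl (pvPackStep t) (chunks, (cur, cnt))).1
           ++ [PySem.Str.join "\n\n" (pieces.foldl (pvPackStep t) (chunks, (cur, cnt))).2.1]
       else (pieces.foldl (pvPackStep t) (chunks, (cur, cnt))).1)
      = chunks ++ (PySem.Str.join "\n\n" (pvTakeGroup t cur cnt pieces).1 ::
                   pvPack t (pvTakeGroup t cur cnt pieces).2) := by
  intro pieces
  induction pieces with
  | nil =>
    intro chunks cur cnt hcur
    simp [pvTakeGroup, pvPack, hcur]
  | cons p ps ih =>
    intro chunks cur cnt hcur
    by_cases h : cnt + pvWc p ≤ t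
    · have hstep : pvPackStep t (chunks, (cur, cnt)) p = (chunks, (cur ++ [p], cnt + pvWc p)) := by
        simp only [pvPackStep]
        rw [if_neg]
        rintro ⟨hgt, -⟩; omega
      have htg : pvTakeGroup t cur cnt (p :: ps) = pvTakeGroup t (cur ++ [p]) (cnt + pvWc p) ps := by
        simp [pvTakeGroup, h]
      simp only [List.foldl_cons, hstep, htg]
      exact ih chunks (cur ++ [p]) (cnt + pvWc p) (by simp)
    · have hstep : pvPackStep t (chunks, (cur, cnt)) p
          = (chunks ++ [PySem.Str.join "\n\n" cur], ([p], pvWc p)) := by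
        simp only [pvPackStep]
        rw [if_pos ⟨by omega, hcur⟩]
      have htg : pvTakeGroup t cur cnt (p :: ps) = (cur, p :: ps) := by
        simp [pvTakeGroup, h]
      simp only [List.foldl_cons, hstep, htg]
      rw [ih (chunks ++ [PySem.Str.join "\n\n" cur]) [p] (pvWc p) (by simp)]
      rw [pvPack]
      simp

-- A's full packing phase = pvPack
theorem pv_pack_eq (t : Int) (pieces : List String) :
    (if (pieces.foldl (pvPackStep t) ([], ([], 0))).2.1 ≠ [] then
       (pieces.foldl (pvPackStep t) ([], ([], 0))).1
         ++ [PySem.Str.join "\n\n" (pieces.foldl (pvPackStep t) ([], ([], 0))).2.1]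
     else (pieces.foldl (pvPackStep t) ([], ([], 0))).1)
    = pvPack t pieces := by
  cases pieces with
  | nil => simp [pvPack]
  | cons p ps =>
    have hstep : pvPackStep t ([], ([], 0)) p = ([], ([p], 0 + pvWc p)) := by
      simp [pvPackStep]
    simp only [List.foldl_cons, hstep]
    rw [pv_pack_loop t ps [] [p] (0 + pvWc p) (by simp)]
    rw [pvPack]
    simp only [zero_add, List.nil_append]

-- ===== VERDICT (by name: the statement is the Claim_ definition above) =====
theorem recursive_chunk_spec : Claim_equal_recursive_chunk := by
  intro text t _ _
  show recursive_chunk text t = recursive_chunk_alt text t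
  simp only [recursive_chunk, recursive_chunk_alt]
  rw [pv_small_pieces_eq t (pvSplitParagraphs text)]
  exact pv_pack_eq t _
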